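-- pv_equiv track=rewrite | github.com/Duy-Thong/I_learn_python | Onthi/PY02028.py | sort_prime_numbers
-- ===== SOURCE A (Python) =====
-- def is_prime(num):
--     if num < 2:
--         return False
--     for i in range(2, int(num**0.5) + 1):
--         if num % i == 0:
--             return False
--     return True
--
-- def sort_prime_numbers(arr):
--     primes = [x for x in arr if is_prime(x)]
--     primes.sort()
--     prime_index = 0
--     result = []
--     for num in arr:
--         if is_prime(num):
--             result.append(primes[prime_index])
--             prime_index += 1
--         else:
--             result.append(num)
--     return result
-- ===== SOURCE B (Python) =====
-- def is_prime(num):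
--     if num < 2:
--         return False
--     for i in range(2, int(num**0.5) + 1):
--         if num % i == 0:
--             return False
--     return True
--
-- def _ripple(result, carry):
--     # Bubble `carry` through the prime slots of `result`: every prime larger
--     # than the current carry is displaced rightward; the final carry lands in
--     # the freshly appended slot at the end.
--     out = []
--     for x in result:
--         if is_prime(x) and x > carry:
--             out.append(carry)
--             carry = x
--         else:
--             out.append(x)
--     out.append(carry)
--     return out
--
-- def sort_prime_numbers(arr):
--     # Online insertion sort over the prime slots: no extraction, no sort(),
--     # no counter -- each prime is rippled into place as it is encountered.
--     result = []
--     for v in arr: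
--         if is_prime(v):
--             result = _ripple(result, v)
--         else:
--             result.append(v)
--     return result
-- ===== Notes on version B (the rewrite author's own statement) =====
-- stated objective: alternative
-- what changed: B replaces A's extract-sort-reinsert pipeline (filter primes, list.sort, rebuild with a running counter) by an online insertion sort: it never builds or sorts a separate primes list; each prime encountered is rippled leftward through the prime slots of the result built so far, displacing larger primes rightward.
import Mathlib
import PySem

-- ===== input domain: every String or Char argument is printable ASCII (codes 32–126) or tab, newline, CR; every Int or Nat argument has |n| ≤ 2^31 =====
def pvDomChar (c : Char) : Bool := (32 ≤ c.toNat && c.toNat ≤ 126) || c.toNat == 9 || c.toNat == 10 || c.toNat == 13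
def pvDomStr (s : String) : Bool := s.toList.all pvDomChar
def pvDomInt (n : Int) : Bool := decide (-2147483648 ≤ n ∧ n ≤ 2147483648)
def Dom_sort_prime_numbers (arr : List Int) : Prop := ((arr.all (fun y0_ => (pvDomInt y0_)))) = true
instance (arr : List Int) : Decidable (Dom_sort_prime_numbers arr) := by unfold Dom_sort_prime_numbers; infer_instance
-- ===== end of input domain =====

-- B replaces A's extract/sort/reinsert pipeline by an online insertion sort over the prime
-- slots (no separate primes list, no sort call, no counter); return values are equal.

-- ===== PORT A =====
-- Shared helper `is_prime` (Source B carries the identical function verbatim, so both ports use it).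
-- `int(num**0.5)` equals `Nat.sqrt num.toNat` exactly for 2 ≤ num ≤ 2^31 (float sqrt is correctly
-- rounded below 2^52); `num % i` with i > 0 is Lean's `%` (emod), which matches Python's `%` there.
def pvIsPrimeLoop (num : Int) : List Int → Bool
  | [] => true
  | i :: rest => if num % i = 0 then false else pvIsPrimeLoop num rest

def pvIsPrime (num : Int) : Bool :=
  if num < 2 then false
  else pvIsPrimeLoop num (PySem.List.pyRange 2 ((Nat.sqrt num.toNat : Int) + 1) 1)

-- A: filter the primes, sort them, then rebuild the whole list with a running counter.
-- (primes[prime_index] is always in range, so pyGetD's default 0 is never used.)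
def sort_prime_numbers (arr : List Int) : List Int :=
  let primes := PySem.List.sorted (arr.filter (fun x => pvIsPrime x)) (fun x => x) false
  (arr.foldl (fun (st : List Int × Int) num =>
      if pvIsPrime num then (st.1 ++ [PySem.List.pyGetD primes st.2 0], st.2 + 1)
      else (st.1 ++ [num], st.2)) ([], 0)).1

-- ===== PORT B =====
-- `_ripple`: bubble `carry` through the prime slots of `result`, appending the final carry.
def pvRipple : List Int → Int → List Int
  | [], carry => [carry]
  | x :: xs, carry =>
    if pvIsPrime x && decide (carry < x) then carry :: pvRipple xs x
    else x :: pvRipple xs carry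

-- B: online insertion sort — each prime is rippled into place as it is encountered.
def sort_prime_numbers_alt (arr : List Int) : List Int :=
  arr.foldl (fun result v => if pvIsPrime v then pvRipple result v else result ++ [v]) []

-- ===== PRECONDITION & SPEC =====
def Spec_sort_prime_numbers (arr : List Int) (out : List Int) : Prop := out = sort_prime_numbers_alt arr
instance (arr : List Int) (out : List Int) : Decidable (Spec_sort_prime_numbers arr out) := by unfold Spec_sort_prime_numbers; infer_instance

-- ===== CLAIM (what is proved, stated in full; the proofs are below) =====
def Claim_equal_sort_prime_numbers : Prop := ∀ (arr : List Int), Dom_sort_prime_numbers arr → Spec_sort_prime_numbers arr (sort_prime_numbers arr)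

-- ===== LEMMAS AND PROOFS =====

-- Canonical structural form of A's rebuild loop: index into `ps` with a running counter.
def pvGoA (ps : List Int) : List Int → Int → List Int
  | [], _ => []
  | x :: xs, i =>
    if pvIsPrime x then PySem.List.pyGetD ps i 0 :: pvGoA ps xs (i + 1)
    else x :: pvGoA ps xs i

-- Scatter: write the values `vs` into the prime slots of `l`, left to right.
def pvGoW : List Int → List Int → List Int
  | [], _ => []
  | x :: xs, vs =>
    if pvIsPrime x then
      match vs with
      | [] => x :: pvGoW xs []
      | v :: vt => v :: pvGoW xs vt
    else x :: pvGoW xs vs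

-- Sorted insertion (after duplicates), the list-level shadow of one ripple pass.
def pvIns (c : Int) : List Int → List Int
  | [] => [c]
  | x :: xs => if c < x then c :: x :: xs else x :: pvIns c xs

theorem pvFoldlA (ps : List Int) : ∀ (l acc : List Int) (i : Int),
    (l.foldl (fun (st : List Int × Int) num =>
      if pvIsPrime num then (st.1 ++ [PySem.List.pyGetD ps st.2 0], st.2 + 1)
      else (st.1 ++ [num], st.2)) (acc, i)).1 = acc ++ pvGoA ps l i := by
  intro l
  induction l with
  | nil => intro acc i; simp [pvGoA]
  | cons x xs ih =>
    intro acc i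
    by_cases h : pvIsPrime x <;> simp [pvGoA, h, List.foldl_cons, ih]

theorem pvGoA_eq_goW (ps : List Int) : ∀ (l : List Int) (i : Nat),
    i + l.countP (fun x => pvIsPrime x) ≤ ps.length →
    pvGoA ps l (i : Int) = pvGoW l (ps.drop i) := by
  intro l
  induction l with
  | nil => intro i _; simp [pvGoA, pvGoW]
  | cons x xs ih =>
    intro i hle
    by_cases h : pvIsPrime x
    · have hcount : xs.countP (fun x => pvIsPrime x) + 1 = (x :: xs).countP (fun x => pvIsPrime x) := by
        simp [h]
      have hi : i < ps.length := by omega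
      have hget : PySem.List.pyGetD ps (i : Int) 0 = ps[i] := by
        simp [PySem.List.pyGetD_natCast, List.getD, List.getElem?_eq_getElem hi]
      have hdrop : ps.drop i = ps[i] :: ps.drop (i + 1) := by
        rw [List.drop_eq_getElem_cons hi]
      have hcast : ((i : Int) + 1) = ((i + 1 : Nat) : Int) := by push_cast; ring
      simp only [pvGoA, h, if_pos, hget, hdrop, pvGoW, hcast]
      rw [ih (i + 1) (by omega)]
    · have hc : (x :: xs).countP (fun x => pvIsPrime x) = xs.countP (fun x => pvIsPrime x) := by
        simp [h]
      simp only [pvGoA, pvGoW, h, Bool.false_eq_true, if_neg, not_false_iff]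
      rw [ih i (by omega)]

theorem pvIns_perm (c : Int) : ∀ (vs : List Int), (pvIns c vs).Perm (c :: vs) := by
  intro vs
  induction vs with
  | nil => simp [pvIns]
  | cons x xs ih =>
    by_cases h : c < x
    · simp [pvIns, h]
    · simp only [pvIns, h, if_neg, not_false_iff]
      exact ((ih.cons x).trans (List.Perm.swap c x xs))

theorem pvIns_length (c : Int) (vs : List Int) : (pvIns c vs).length = vs.length + 1 := by
  simpa using (pvIns_perm c vs).length_eq

theorem pvIns_mem {c w : Int} {vs : List Int} (h : w ∈ pvIns c vs) : w = c ∨ w ∈ vs := by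
  have := (pvIns_perm c vs).mem_iff.mp h
  simpa using this

theorem pvIns_sorted (c : Int) : ∀ (vs : List Int), vs.Pairwise (· ≤ ·) →
    (pvIns c vs).Pairwise (· ≤ ·) := by
  intro vs
  induction vs with
  | nil => intro _; simp [pvIns]
  | cons x xs ih =>
    intro hs
    rcases List.pairwise_cons.mp hs with ⟨hx, hxs⟩
    by_cases h : c < x
    · simp only [pvIns, h, if_pos]
      refine List.pairwise_cons.mpr ⟨?_, hs⟩
      intro y hy
      rcases List.mem_cons.mp hy with rfl | hy
      · omega
      · have := hx y hy; omega
    · simp only [pvIns, h, if_neg, not_false_iff]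
      refine List.pairwise_cons.mpr ⟨?_, ih hxs⟩
      intro y hy
      rcases pvIns_mem hy with rfl | hy
      · omega
      · exact hx y hy

theorem pvIns_min (w : Int) : ∀ (ws : List Int), ws.Pairwise (· ≤ ·) →
    (∀ y ∈ ws, w ≤ y) → pvIns w ws = w :: ws := by
  intro ws
  induction ws with
  | nil => intro _ _; rfl
  | cons x xs ih =>
    intro hs hmin
    by_cases h : w < x
    · simp [pvIns, h]
    · have hwx : w ≤ x := hmin x (List.mem_cons_self ..)
      have hxw : x = w := by omega
      rcases List.pairwise_cons.mp hs with ⟨hx, hxs⟩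
      simp only [pvIns, h, if_neg, not_false_iff]
      rw [ih hxs (fun y hy => by have := hx y hy; omega), hxw]

-- One ripple pass on the scattered list is a sorted insertion on the value list.
theorem pvRipple_goW (v : Int) (hv : pvIsPrime v) : ∀ (p vs : List Int) (c : Int),
    vs.Pairwise (· ≤ ·) → (∀ w ∈ vs, pvIsPrime w) →
    vs.length = p.countP (fun x => pvIsPrime x) →
    pvRipple (pvGoW p vs) c = pvGoW (p ++ [v]) (pvIns c vs) := by
  intro p
  induction p with
  | nil =>
    intro vs c _ _ hlen
    have : vs = [] := List.length_eq_zero_iff.mp (by simpa using hlen)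
    subst this
    simp [pvGoW, pvRipple, pvIns, hv]
  | cons x xs ih =>
    intro vs c hs hprime hlen
    by_cases h : pvIsPrime x
    · have hc : (x :: xs).countP (fun y => pvIsPrime y) = xs.countP (fun y => pvIsPrime y) + 1 :=
        by simp [h]
      cases vs with
      | nil => rw [hc] at hlen; simp at hlen
      
      | cons w ws =>
        rcases List.pairwise_cons.mp hs with ⟨hw, hws⟩
        have hwp : pvIsPrime w := hprime w (List.mem_cons_self ..)
        have hwsp : ∀ y ∈ ws, pvIsPrime y := fun y hy => hprime y (List.mem_cons_of_mem _ hy)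
        have hlen' : ws.length = xs.countP (fun y => pvIsPrime y) := by
          rw [hc] at hlen; simpa using hlen
        have g1 : pvGoW (x :: xs) (w :: ws) = w :: pvGoW xs ws := by simp [pvGoW, h]
        by_cases hcw : c < w
        · -- carry is placed here, w becomes the new carry
          have g2 : pvRipple (w :: pvGoW xs ws) c = c :: pvRipple (pvGoW xs ws) w := by
            simp [pvRipple, hwp, hcw]
          have g3 : pvIns c (w :: ws) = c :: w :: ws := by simp [pvIns, hcw]
          have g4 : pvGoW ((x :: xs) ++ [v]) (c :: w :: ws) = c :: pvGoW (xs ++ [v]) (w :: ws) := by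
            simp [pvGoW, h]
          rw [g1, g2, g3, g4, ih ws w hws hwsp hlen', pvIns_min w ws hws hw]
        · -- w stays, carry continues
          have g2 : pvRipple (w :: pvGoW xs ws) c = w :: pvRipple (pvGoW xs ws) c := by
            simp [pvRipple, hcw]
          have g3 : pvIns c (w :: ws) = w :: pvIns c ws := by simp [pvIns, hcw]
          have g4 : pvGoW ((x :: xs) ++ [v]) (w :: pvIns c ws) = w :: pvGoW (xs ++ [v]) (pvIns c ws) := by
            simp [pvGoW, h]
          rw [g1, g2, g3, g4, ih ws c hws hwsp hlen']
    · have hc : (x :: xs).countP (fun y => pvIsPrime y) = xs.countP (fun y => pvIsPrime y) :=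
        by simp [h]
      have g1 : pvGoW (x :: xs) vs = x :: pvGoW xs vs := by simp [pvGoW, h]
      have g2 : pvRipple (x :: pvGoW xs vs) c = x :: pvRipple (pvGoW xs vs) c := by
        simp [pvRipple, h]
      have g4 : pvGoW ((x :: xs) ++ [v]) (pvIns c vs) = x :: pvGoW (xs ++ [v]) (pvIns c vs) := by
        simp [pvGoW, h]
      rw [g1, g2, g4, ih vs c hs hprime (by rw [hlen, hc])]

theorem pvGoW_snoc (v : Int) : ∀ (p vs : List Int), vs.length ≤ p.countP (fun x => pvIsPrime x) →
    pvGoW (p ++ [v]) vs = pvGoW p vs ++ [v] := by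
  intro p
  induction p with
  | nil =>
    intro vs hlen
    have : vs = [] := by
      cases vs with
      | nil => rfl
      | cons a t => simp at hlen
    subst this
    by_cases h : pvIsPrime v <;> simp [pvGoW, h]
  | cons x xs ih =>
    intro vs hlen
    by_cases h : pvIsPrime x
    · have hc : (x :: xs).countP (fun y => pvIsPrime y) = xs.countP (fun y => pvIsPrime y) + 1 :=
        by simp [h]
      cases vs with
      | nil =>
        have g1 : pvGoW ((x :: xs) ++ [v]) ([] : List Int) = x :: pvGoW (xs ++ [v]) [] := by
          simp [pvGoW, h]
        have g2 : pvGoW (x :: xs) ([] : List Int) = x :: pvGoW xs [] := by simp [pvGoW, h]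
        rw [g1, g2, ih [] (by simp)]; rfl
      | cons w ws =>
        have g1 : pvGoW ((x :: xs) ++ [v]) (w :: ws) = w :: pvGoW (xs ++ [v]) ws := by
          simp [pvGoW, h]
        have g2 : pvGoW (x :: xs) (w :: ws) = w :: pvGoW xs ws := by simp [pvGoW, h]
        rw [g1, g2, ih ws (by rw [hc] at hlen; simpa using hlen)]; rfl
    · have hc : (x :: xs).countP (fun y => pvIsPrime y) = xs.countP (fun y => pvIsPrime y) :=
        by simp [h]
      have g1 : pvGoW ((x :: xs) ++ [v]) vs = x :: pvGoW (xs ++ [v]) vs := by simp [pvGoW, h]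
      have g2 : pvGoW (x :: xs) vs = x :: pvGoW xs vs := by simp [pvGoW, h]
      rw [g1, g2, ih vs (by rw [hc] at hlen; exact hlen)]; rfl

-- The value-list shadow of B's outer loop.
def pvT (l : List Int) (a : List Int) : List Int :=
  l.foldl (fun acc v => if pvIsPrime v then pvIns v acc else acc) a

theorem pvFoldB : ∀ (l p vs : List Int),
    vs.Pairwise (· ≤ ·) → (∀ w ∈ vs, pvIsPrime w) →
    vs.length = p.countP (fun x => pvIsPrime x) →
    l.foldl (fun result v => if pvIsPrime v then pvRipple result v else result ++ [v]) (pvGoW p vs)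
      = pvGoW (p ++ l) (pvT l vs) := by
  intro l
  induction l with
  | nil => intro p vs _ _ _; simp [pvT]
  | cons v t ih =>
    intro p vs hs hprime hlen
    by_cases h : pvIsPrime v
    · simp only [List.foldl_cons, h, if_pos, pvT]
      rw [pvRipple_goW v h p vs v hs hprime hlen]
      have hlen' : (pvIns v vs).length = (p ++ [v]).countP (fun x => pvIsPrime x) := by
        simp [pvIns_length, hlen, h]
      have hp' : ∀ w ∈ pvIns v vs, pvIsPrime w := by
        intro w hw
        rcases pvIns_mem hw with rfl | hw
        · exact h
        · exact hprime w hw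
      have := ih (p ++ [v]) (pvIns v vs) (pvIns_sorted v vs hs) hp' hlen'
      simpa [pvT] using this
    · simp only [List.foldl_cons, h, Bool.false_eq_true, if_neg, not_false_iff, pvT]
      rw [← pvGoW_snoc v p vs (le_of_eq hlen)]
      have hlen' : vs.length = (p ++ [v]).countP (fun x => pvIsPrime x) := by
        simp [hlen, h]
      have := ih (p ++ [v]) vs hs hprime hlen'
      simpa [pvT] using this

theorem pvT_perm : ∀ (l a : List Int), (pvT l a).Perm (l.filter (fun x => pvIsPrime x) ++ a) := by
  intro l
  induction l with
  | nil => intro a; simp [pvT]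
  | cons v t ih =>
    intro a
    by_cases h : pvIsPrime v
    · have e1 : pvT (v :: t) a = pvT t (pvIns v a) := by simp [pvT, h]
      have e2 : (v :: t).filter (fun x => pvIsPrime x) = v :: t.filter (fun x => pvIsPrime x) :=
        List.filter_cons_of_pos (by simpa using h)
      rw [e1, e2]
      refine (ih (pvIns v a)).trans ?_
      refine (List.Perm.append_left _ (pvIns_perm v a)).trans ?_
      exact List.perm_middle
    · have e1 : pvT (v :: t) a = pvT t a := by simp [pvT, h]
      have e2 : (v :: t).filter (fun x => pvIsPrime x) = t.filter (fun x => pvIsPrime x) :=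
        List.filter_cons_of_neg (by simpa using h)
      rw [e1, e2]
      exact ih a

theorem pvT_sorted : ∀ (l a : List Int), a.Pairwise (· ≤ ·) → (pvT l a).Pairwise (· ≤ ·) := by
  intro l
  induction l with
  | nil => intro a h; simpa [pvT] using h
  | cons v t ih =>
    intro a h
    by_cases hv : pvIsPrime v
    · simpa [pvT, hv] using ih (pvIns v a) (pvIns_sorted v a h)
    · simpa [pvT, hv] using ih a h

-- ===== VERDICT (by name: the statement is the Claim_ definition above) =====
theorem sort_prime_numbers_spec : Claim_equal_sort_prime_numbers := by
  intro arr _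
  unfold Spec_sort_prime_numbers sort_prime_numbers sort_prime_numbers_alt
  simp only []
  set ps := PySem.List.sorted (arr.filter (fun x => pvIsPrime x)) (fun x => x) false with hps
  have hlen : ps.length = arr.countP (fun x => pvIsPrime x) := by
    rw [hps, PySem.List.length_sorted, ← List.countP_eq_length_filter]
  -- A's loop = scatter of the sorted primes
  have hA : (arr.foldl (fun (st : List Int × Int) num =>
      if pvIsPrime num then (st.1 ++ [PySem.List.pyGetD ps st.2 0], st.2 + 1)
      else (st.1 ++ [num], st.2)) ([], 0)).1 = pvGoW arr ps := by
    have h1 := pvFoldlA ps arr [] 0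
    have h0 : (0 : Int) = ((0 : Nat) : Int) := by norm_num
    rw [h0] at h1
    rw [pvGoA_eq_goW ps arr 0 (by omega)] at h1
    simpa using h1
  -- B's loop = scatter of the incrementally inserted primes
  have hB : arr.foldl (fun result v => if pvIsPrime v then pvRipple result v else result ++ [v]) []
      = pvGoW arr (pvT arr []) := by
    have := pvFoldB arr [] [] (by simp) (by simp) (by simp)
    simpa [pvGoW] using this
  -- the two value lists coincide: both are sorted rearrangements of the primes
  have hperm : (pvT arr []).Perm (arr.filter (fun x => pvIsPrime x)) := by
    simpa using pvT_perm arr []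
  have hsorted : (pvT arr []).Pairwise (· ≤ ·) := pvT_sorted arr [] (by simp)
  have hTs : ps = pvT arr [] := by
    rw [hps]
    exact PySem.List.sorted_id_eq_of_perm_of_pairwise _ _ hperm hsorted
  rw [hA, hB, hTs]
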